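-- pv_equiv track=rewrite | github.com/lcqbit11/algorithms | hard/super-egg-drop.py | super_egg_drop2
-- ===== SOURCE A (Python) =====
-- def super_egg_drop2(K, N):
--     dp = [[0 for _ in range(N+1)] for _ in range(K+1)]
--     for t in range(1, N + 1):
--         dp[1][t] = t
--
--     for i in range(2, K + 1):
--         s = 1
--         for j in range(1, N + 1):
--             dp[i][j] = j
--             while s < j and dp[i - 1][s - 1] < dp[i][j - s]:
--                 s += 1
--             dp[i][j] = min(dp[i][j], max(dp[i - 1][s - 1], dp[i][j - s]) + 1)
--
--     return dp[K][N]
-- ===== SOURCE B (Python) =====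
-- def super_egg_drop2(K, N):
--     # f[i] = max number of floors distinguishable with i eggs in t trials;
--     # grow t until f[K] >= N:   f_t[i] = f_{t-1}[i-1] + f_{t-1}[i] + 1
--     f = [0] * (K + 1)
--     t = 0
--     while f[K] < N:
--         t += 1
--         for i in range(K, 0, -1):
--             f[i] += f[i - 1] + 1
--     return t
-- ===== Notes on version B (the rewrite author's own statement) =====
-- stated objective: faster
-- what changed: Instead of the O(K*N) floor-indexed DP with a moving split pointer, B counts the maximal number of floors coverable in t trials (the binomial-sum recurrence f[i] += f[i-1]+1) and returns the first t with f[K] >= N.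
import Mathlib
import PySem

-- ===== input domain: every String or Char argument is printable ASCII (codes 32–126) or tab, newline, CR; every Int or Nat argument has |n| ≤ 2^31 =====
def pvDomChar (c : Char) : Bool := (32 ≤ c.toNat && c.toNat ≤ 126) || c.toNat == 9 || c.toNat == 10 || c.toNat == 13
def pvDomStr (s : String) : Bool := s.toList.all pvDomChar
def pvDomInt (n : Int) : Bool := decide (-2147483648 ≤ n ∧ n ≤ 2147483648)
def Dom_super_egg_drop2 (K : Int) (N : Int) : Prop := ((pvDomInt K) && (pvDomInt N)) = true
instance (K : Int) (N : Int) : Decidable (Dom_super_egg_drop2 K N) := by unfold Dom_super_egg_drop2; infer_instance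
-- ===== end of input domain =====

-- B replaces the O(K*N) floor-indexed DP by the trials-count recurrence (max floors coverable
-- in t trials), searching the least sufficient t: objective 'faster' (asymptotic).

-- ===== PORT A =====
-- Rows are List Int with List.set/List.getD; under Pre_ every index the Python touches is
-- nonnegative and in range (Python raises IndexError on the excluded inputs).

-- while s < j and dp[i-1][s-1] < dp[i][j-s]: s += 1   (fuel j suffices: s stays ≤ j)
def pvAdv (prev cur : List Int) (j : Nat) : Nat → Nat → Nat
  | s, 0 => s
  | s, fuel+1 =>
    if s < j ∧ prev.getD (s-1) 0 < cur.getD (j-s) 0 then pvAdv prev cur j (s+1) fuel else s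

-- body of the inner 'for j' loop; state = (row i under construction, s)
def pvColStep (prev : List Int) (st : List Int × Nat) (j : Nat) : List Int × Nat :=
  let cur := st.1.set j (j : Int)                    -- dp[i][j] = j
  let s := pvAdv prev cur j st.2 j                   -- the while loop
  (cur.set j (min (cur.getD j 0) (max (prev.getD (s-1) 0) (cur.getD (j-s) 0) + 1)), s)

-- row i (i ≥ 2), built from row i-1 by 'for j in range(1, N+1)' with s starting at 1
def pvRowA (prev : List Int) (n : Nat) : List Int :=
  ((List.range' 1 n).foldl (pvColStep prev) (List.replicate (n+1) (0:Int), 1)).1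

-- for t in range(1, N+1): dp[1][t] = t
def pvRow1 (n : Nat) : List Int :=
  (List.range' 1 n).foldl (fun r t => r.set t (t : Int)) (List.replicate (n+1) (0:Int))

def super_egg_drop2 (K : Int) (N : Int) : Int :=
  let k := K.toNat
  let n := N.toNat
  let dp0 : List (List Int) := List.replicate (k+1) (List.replicate (n+1) (0:Int))
  let dp1 := dp0.set 1 (pvRow1 n)
  let dp := (List.range' 2 (k-1)).foldl (fun d i => d.set i (pvRowA (d.getD (i-1) []) n)) dp1
  (dp.getD k []).getD n 0

-- ===== PORT B =====
-- for i in range(K, 0, -1): f[i] += f[i-1] + 1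
def pvStepB (f : List Int) : Nat → List Int
  | 0 => f
  | i+1 => pvStepB (f.set (i+1) (f.getD (i+1) 0 + f.getD i 0 + 1)) i

-- while f[K] < N: t += 1; <pvStepB>   (fuel N.toNat suffices on Pre_: the answer is ≤ N)
def pvLoopB (k : Nat) (N : Int) : List Int → Nat → Nat → Nat
  | _, t, 0 => t
  | f, t, fuel+1 => if f.getD k 0 < N then pvLoopB k N (pvStepB f k) (t+1) fuel else t

def super_egg_drop2_alt (K : Int) (N : Int) : Int :=
  (pvLoopB K.toNat N (List.replicate (K.toNat+1) (0:Int)) 0 N.toNat : Int)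

-- ===== PRECONDITION & SPEC =====
-- Pre_ is exactly where the Python A returns: it raises IndexError when N < 0, K < 0,
-- or K = 0 < N (dp[1][t] or dp[K][N] out of range).
def Pre_super_egg_drop2 (K : Int) (N : Int) : Prop := 0 ≤ N ∧ (1 ≤ K ∨ (K = 0 ∧ N = 0))
instance (K : Int) (N : Int) : Decidable (Pre_super_egg_drop2 K N) := by
  unfold Pre_super_egg_drop2; infer_instance
def pvWitness_super_egg_drop2 : Int × Int := (2, 6)

def Spec_super_egg_drop2 (K : Int) (N : Int) (out : Int) : Prop := out = super_egg_drop2_alt K N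
instance (K : Int) (N : Int) (out : Int) : Decidable (Spec_super_egg_drop2 K N out) := by
  unfold Spec_super_egg_drop2; infer_instance

-- ===== CLAIM (what is proved, stated in full; the proofs are below) =====
def Claim_equal_super_egg_drop2 : Prop := ∀ (K : Int) (N : Int), Dom_super_egg_drop2 K N → Pre_super_egg_drop2 K N → Spec_super_egg_drop2 K N (super_egg_drop2 K N)

-- ===== LEMMAS AND PROOFS =====

-- pvF t k = max number of floors distinguishable with k eggs in t trials
def pvF : Nat → Nat → Nat
  | 0, _ => 0
  | _+1, 0 => 0
  | t+1, k+1 => pvF t k + pvF t (k+1) + 1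

-- pvT i j = least t with j ≤ pvF t i  (meaningful for i ≥ 1)
def pvT (i : Nat) : Nat → Nat
  | 0 => 0
  | j+1 => let t := pvT i j; if pvF t i ≤ j then t + 1 else t

theorem pvF_zero_right (t : Nat) : pvF t 0 = 0 := by cases t <;> rfl

theorem pvF_succ (t k : Nat) : pvF (t+1) (k+1) = pvF t k + pvF t (k+1) + 1 := rfl

theorem pvF_lt_succ (t k : Nat) : pvF t (k+1) < pvF (t+1) (k+1) := by
  rw [pvF_succ]; omega

theorem pvF_mono_t {t t' : Nat} (k : Nat) (h : t ≤ t') : pvF t k ≤ pvF t' k := by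
  induction h with
  | refl => exact le_rfl
  | @step t'' h' ih =>
    cases k with
    | zero => simp [pvF_zero_right]
    | succ k => exact le_trans ih (le_of_lt (pvF_lt_succ t'' k))

theorem pvF_mono_k {k k' : Nat} (t : Nat) (h : k ≤ k') : pvF t k ≤ pvF t k' := by
  induction t generalizing k k' with
  | zero => simp [pvF]
  | succ t ih =>
    cases k with
    | zero => simp [pvF_zero_right]
    | succ k =>
      cases k' with
      | zero => omega
      | succ k' => rw [pvF_succ, pvF_succ]
                   have h1 := ih (k := k) (k' := k') (by omega)
                   have h2 := ih (k := k+1) (k' := k'+1) (by omega)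
                   omega

theorem pvF_one (t : Nat) : pvF t 1 = t := by
  induction t with
  | zero => rfl
  | succ t ih => rw [pvF_succ, pvF_zero_right, ih]; omega

theorem pvF_pred {t i : Nat} (ht : 1 ≤ t) (hi : 1 ≤ i) :
    pvF t i = pvF (t-1) (i-1) + pvF (t-1) i + 1 := by
  cases t with
  | zero => omega
  | succ t => cases i with
    | zero => omega
    | succ i => simp [pvF_succ]

theorem pvF_lt_pred {t i : Nat} (ht : 1 ≤ t) (hi : 1 ≤ i) : pvF (t-1) i < pvF t i := by
  cases t with
  | zero => omega
  | succ t => cases i with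
    | zero => omega
    | succ i => simpa using pvF_lt_succ t i

-- the central characterisation of pvT
theorem pvT_le_iff {i : Nat} (hi : 1 ≤ i) (j m : Nat) : pvT i j ≤ m ↔ j ≤ pvF m i := by
  induction j generalizing m with
  | zero => simp [pvT]
  | succ j ih =>
    have hFt : j ≤ pvF (pvT i j) i := (ih (pvT i j)).mp le_rfl
    show (if pvF (pvT i j) i ≤ j then pvT i j + 1 else pvT i j) ≤ m ↔ _
    split_ifs with h
    · have heq : pvF (pvT i j) i = j := by omega
      constructor
      · intro hm
        have h1 : pvF (pvT i j + 1 - 1) i < pvF (pvT i j + 1) i := pvF_lt_pred (by omega) hi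
        have h2 : pvF (pvT i j + 1) i ≤ pvF m i := pvF_mono_t i hm
        simp only [Nat.add_sub_cancel] at h1
        omega
      · intro hm
        have h1 : pvT i j ≤ m := (ih m).mpr (by omega)
        rcases Nat.lt_or_ge (pvT i j) m with h' | h'
        · omega
        · have : pvT i j = m := by omega
          rw [← this, heq] at hm; omega
    · constructor
      · intro hm
        have := pvF_mono_t (t := pvT i j) (t' := m) i hm
        omega
      · intro hm
        exact (ih m).mpr (by omega)

theorem pvF_pvT_ge {i : Nat} (hi : 1 ≤ i) (j : Nat) : j ≤ pvF (pvT i j) i :=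
  (pvT_le_iff hi j (pvT i j)).mp le_rfl

theorem pvT_le_self {i : Nat} (hi : 1 ≤ i) (j : Nat) : pvT i j ≤ j :=
  (pvT_le_iff hi j j).mpr (le_trans (by rw [pvF_one]) (pvF_mono_k j hi))

theorem pvT_one (j : Nat) : pvT 1 j = j := by
  have h1 := pvT_le_self le_rfl j
  have h2 := pvF_pvT_ge le_rfl j
  rw [pvF_one] at h2; omega

theorem pvT_zero (i : Nat) : pvT i 0 = 0 := rfl

theorem pvT_mono_j {i : Nat} (hi : 1 ≤ i) {j j' : Nat} (h : j ≤ j') : pvT i j ≤ pvT i j' :=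
  (pvT_le_iff hi j _).mpr (le_trans h (pvF_pvT_ge hi j'))

-- the crossing-point lemma: A's single evaluated split s gives the optimum
theorem pvCross {i j s : Nat} (hi : 2 ≤ i) (hs1 : 1 ≤ s) (hsj : s ≤ j) (hj : 1 ≤ j)
    (stop : s = j ∨ pvT i (j-s) ≤ pvT (i-1) (s-1))
    (arr : s = 1 ∨ pvT (i-1) (s-2) < pvT i (j-s+1)) :
    min j (max (pvT (i-1) (s-1)) (pvT i (j-s)) + 1) = pvT i j := by
  have hi1 : 1 ≤ i - 1 := by omega
  have hii : 1 ≤ i := by omega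
  have ht_le_j : pvT i j ≤ j := pvT_le_self hii j
  -- pvT i j ≤ max a b + 1
  have hFa : s - 1 ≤ pvF (max (pvT (i-1) (s-1)) (pvT i (j-s))) (i-1) :=
    le_trans (pvF_pvT_ge hi1 (s-1)) (pvF_mono_t _ (le_max_left _ _))
  have hFb : j - s ≤ pvF (max (pvT (i-1) (s-1)) (pvT i (j-s))) i :=
    le_trans (pvF_pvT_ge hii (j-s)) (pvF_mono_t _ (le_max_right _ _))
  have hsum : j ≤ pvF (max (pvT (i-1) (s-1)) (pvT i (j-s)) + 1) i := by
    have := pvF_pred (t := max (pvT (i-1) (s-1)) (pvT i (j-s)) + 1) (i := i) (by omega) hii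
    simp only [Nat.add_sub_cancel] at this
    omega
  have ht_le : pvT i j ≤ max (pvT (i-1) (s-1)) (pvT i (j-s)) + 1 :=
    (pvT_le_iff hii j _).mpr hsum
  rcases Nat.lt_or_ge (pvT i j) j with htj | htj
  · -- pvT i j < j: show a ≤ t-1 and b ≤ t-1 for t := pvT i j
    have ht1 : 1 ≤ pvT i j := by
      by_contra h
      have h0 : pvT i j ≤ 0 := by omega
      have := (pvT_le_iff hii j 0).mp h0
      have hF0 : pvF 0 i = 0 := by cases i <;> rfl
      omega
    have hFt : j ≤ pvF (pvT i j) i := pvF_pvT_ge hii j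
    have hFt1 : pvF (pvT i j - 1) i < j := by
      by_contra hcon
      push_neg at hcon
      have := (pvT_le_iff hii j (pvT i j - 1)).mpr hcon
      omega
    have hA : s - 1 ≤ pvF (pvT i j - 1) (i-1) := by
      by_contra hcon
      push_neg at hcon
      have hs2 : 2 ≤ s := by
        rcases Nat.lt_or_ge s 2 with h' | h'
        · have hseq : s - 1 = 0 := by omega
          rw [hseq] at hcon
          omega
        · exact h'
      rcases arr with h' | harr
      · omega
      · have hrec : pvF (pvT i j) i = pvF (pvT i j - 1) (i-1) + pvF (pvT i j - 1) i + 1 :=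
          pvF_pred ht1 hii
        have hb2 : pvT i (j-s+1) ≤ pvT i j - 1 := (pvT_le_iff hii _ _).mpr (by omega)
        have ha2 : pvT i j - 1 ≤ pvT (i-1) (s-2) := by
          rcases Nat.lt_or_ge (pvT i j) 2 with h2 | h2
          · omega
          · by_contra hc
            push_neg at hc
            have hle : pvT (i-1) (s-2) ≤ pvT i j - 2 := by omega
            have hF2 : s - 2 ≤ pvF (pvT i j - 2) (i-1) := (pvT_le_iff hi1 _ _).mp hle
            have hstrict : pvF (pvT i j - 1 - 1) (i-1) < pvF (pvT i j - 1) (i-1) :=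
              pvF_lt_pred (by omega) hi1
            have : pvT i j - 1 - 1 = pvT i j - 2 := by omega
            rw [this] at hstrict
            omega
        omega
    have ha_le : pvT (i-1) (s-1) ≤ pvT i j - 1 := (pvT_le_iff hi1 _ _).mpr hA
    have hb_le : pvT i (j-s) ≤ pvT i j - 1 := by
      rcases stop with hsj' | hba
      · have hjs0 : j - s = 0 := by omega
        rw [hjs0, pvT_zero]; omega
      · omega
    omega
  · omega

-- list access helpers
theorem pvGetD_set {α : Type} (l : List α) (i j : Nat) (v d : α) :
    (l.set i v).getD j d = if i = j ∧ i < l.length then v else l.getD j d := by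
  simp only [List.getD, List.getElem?_set]
  split_ifs <;> simp_all <;> omega

theorem pvGetD_replicate0 (n j : Nat) : (List.replicate n (0:Int)).getD j 0 = 0 := by
  simp only [List.getD]
  rcases Nat.lt_or_ge j n with h | h
  · simp [List.getElem?_replicate, h]
  · rw [List.getElem?_eq_none (by simpa using h)]; rfl

-- == row values predicate ==
def pvRowVals (i n : Nat) (row : List Int) : Prop :=
  row.length = n + 1 ∧ ∀ m, m ≤ n → row.getD m 0 = (pvT i m : Int)

-- == row 1 ==
theorem pvRow1_aux (b : Nat) : ∀ (a : Nat) (r : List Int), a + b ≤ r.length →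
    (((List.range' a b).foldl (fun r t => r.set t (t : Int)) r).length = r.length ∧
     ∀ m, ((List.range' a b).foldl (fun r t => r.set t (t : Int)) r).getD m 0 =
       if a ≤ m ∧ m < a + b then (m : Int) else r.getD m 0) := by
  induction b with
  | zero => intro a r _; simp
  | succ b ih =>
    intro a r hlen
    rw [List.range'_succ, List.foldl_cons]
    obtain ⟨ihl, ihv⟩ := ih (a+1) (r.set a (a:Int)) (by simp; omega)
    refine ⟨by simp [ihl], ?_⟩
    intro m
    rw [ihv m, pvGetD_set]
    split_ifs <;> simp_all <;> omega

theorem pvRow1_spec (n : Nat) : pvRowVals 1 n (pvRow1 n) := by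
  unfold pvRowVals pvRow1
  obtain ⟨hl, hv⟩ := pvRow1_aux n 1 (List.replicate (n+1) (0:Int)) (by simp; omega)
  refine ⟨by rw [hl]; simp, ?_⟩
  intro m hm
  rw [hv m, pvT_one]
  split_ifs with h
  · rfl
  · rw [pvGetD_replicate0]
    have : m = 0 := by omega
    simp [this]

-- == row i ≥ 2: invariants ==
def pvInv (i n j : Nat) (st : List Int × Nat) : Prop :=
  st.1.length = n + 1 ∧
  (∀ m, m ≤ j → st.1.getD m 0 = (pvT i m : Int)) ∧
  (∀ m, j < m → st.1.getD m 0 = 0) ∧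
  1 ≤ st.2 ∧ st.2 ≤ max j 1 ∧
  (st.2 = 1 ∨ pvT (i-1) (st.2 - 2) < pvT i (j - st.2 + 1))

theorem pvAdv_spec {i n : Nat} (hi : 2 ≤ i) (prev cur : List Int) (j : Nat)
    (hjn : j ≤ n)
    (hprevv : ∀ m, m ≤ n → prev.getD m 0 = (pvT (i-1) m : Int))
    (hcurv : ∀ m, m < j → cur.getD m 0 = (pvT i m : Int)) :
    ∀ (fuel s : Nat), 1 ≤ s → s ≤ j → j - s ≤ fuel →
    (s = 1 ∨ pvT (i-1) (s - 2) < pvT i (j - s + 1)) →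
    (let s' := pvAdv prev cur j s fuel
     1 ≤ s' ∧ s' ≤ j ∧ (s' = 1 ∨ pvT (i-1) (s' - 2) < pvT i (j - s' + 1)) ∧
     (s' = j ∨ pvT i (j - s') ≤ pvT (i-1) (s' - 1))) := by
  have hi1 : 1 ≤ i - 1 := by omega
  intro fuel
  induction fuel with
  | zero =>
    intro s hs1 hsj hfuel harr
    have : s = j := by omega
    simp only [pvAdv]
    exact ⟨hs1, hsj, harr, Or.inl this⟩
  | succ fuel ih =>
    intro s hs1 hsj hfuel harr
    simp only [pvAdv]
    split_ifs with hcond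
    · obtain ⟨hslt, hval⟩ := hcond
      have hr1 : prev.getD (s-1) 0 = (pvT (i-1) (s-1) : Int) := hprevv _ (by omega)
      have hr2 : cur.getD (j-s) 0 = (pvT i (j-s) : Int) := hcurv _ (by omega)
      rw [hr1, hr2] at hval
      have hvalN : pvT (i-1) (s-1) < pvT i (j-s) := by exact_mod_cast hval
      refine ih (s+1) (by omega) (by omega) (by omega) ?_
      right
      have h1 : s + 1 - 2 = s - 1 := by omega
      have h2 : j - (s+1) + 1 = j - s := by omega
      rw [h1, h2]
      exact hvalN
    · push_neg at hcond
      rcases Nat.lt_or_ge s j with hlt | hge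
      · have hval := hcond hlt
        have hr1 : prev.getD (s-1) 0 = (pvT (i-1) (s-1) : Int) := hprevv _ (by omega)
        have hr2 : cur.getD (j-s) 0 = (pvT i (j-s) : Int) := hcurv _ (by omega)
        rw [hr1, hr2] at hval
        exact ⟨hs1, hsj, harr, Or.inr (by exact_mod_cast hval)⟩
      · exact ⟨hs1, hsj, harr, Or.inl (by omega)⟩

theorem pvColStep_inv {i n j : Nat} (hi : 2 ≤ i) (prev : List Int)
    (hprevl : prev.length = n + 1) (hprevv : ∀ m, m ≤ n → prev.getD m 0 = (pvT (i-1) m : Int))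
    (st : List Int × Nat) (hst : pvInv i n j st) (hjn : j + 1 ≤ n) :
    pvInv i n (j+1) (pvColStep prev st (j+1)) := by
  obtain ⟨hlen, hval, hzero, hs1, hsmax, harr⟩ := hst
  have hii : 1 ≤ i := by omega
  have hi1 : 1 ≤ i - 1 := by omega
  have hpc : pvColStep prev st (j+1) =
      ((st.1.set (j+1) ((j+1 : Nat) : Int)).set (j+1)
        (min ((st.1.set (j+1) ((j+1 : Nat) : Int)).getD (j+1) 0)
          (max (prev.getD (pvAdv prev (st.1.set (j+1) ((j+1 : Nat) : Int)) (j+1) st.2 (j+1) - 1) 0)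
               ((st.1.set (j+1) ((j+1 : Nat) : Int)).getD
                 ((j+1) - pvAdv prev (st.1.set (j+1) ((j+1 : Nat) : Int)) (j+1) st.2 (j+1)) 0) + 1)),
       pvAdv prev (st.1.set (j+1) ((j+1 : Nat) : Int)) (j+1) st.2 (j+1)) := rfl
  rw [hpc]
  set cur := st.1.set (j+1) ((j+1 : Nat) : Int) with hcurdef
  have hcur_len : cur.length = n + 1 := by simp [hcurdef, hlen]
  have hcur_at : ∀ m, m < j + 1 → cur.getD m 0 = (pvT i m : Int) := by
    intro m hm
    rw [hcurdef, pvGetD_set]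
    split_ifs with h
    · omega
    · exact hval m (by omega)
  have hcur_j : cur.getD (j+1) 0 = ((j+1 : Nat) : Int) := by
    rw [hcurdef, pvGetD_set, if_pos ⟨rfl, by omega⟩]
  have hcur_big : ∀ m, j + 1 < m → cur.getD m 0 = 0 := by
    intro m hm
    rw [hcurdef, pvGetD_set]
    split_ifs with h
    · omega
    · exact hzero m (by omega)
  have harr' : st.2 = 1 ∨ pvT (i-1) (st.2 - 2) < pvT i ((j+1) - st.2 + 1) := by
    rcases harr with h | h
    · exact Or.inl h
    · exact Or.inr (lt_of_lt_of_le h (pvT_mono_j hii (by omega)))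
  have hadv := pvAdv_spec (n := n) hi prev cur (j+1) hjn hprevv hcur_at
      (j+1) st.2 hs1 (by omega) (by omega) harr'
  set s' := pvAdv prev cur (j+1) st.2 (j+1) with hs'def
  obtain ⟨hs'1, hs'j, hs'arr, hs'stop⟩ := hadv
  have hread_prev : prev.getD (s'-1) 0 = (pvT (i-1) (s'-1) : Int) := hprevv _ (by omega)
  have hread_cur : cur.getD ((j+1)-s') 0 = (pvT i ((j+1)-s') : Int) := hcur_at _ (by omega)
  have hvwrite : min (cur.getD (j+1) 0)
      (max (prev.getD (s'-1) 0) (cur.getD ((j+1)-s') 0) + 1) = (pvT i (j+1) : Int) := by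
    rw [hcur_j, hread_prev, hread_cur]
    have hx := pvCross (j := j+1) hi hs'1 hs'j (by omega) hs'stop hs'arr
    rw [← hx]
    push_cast
    omega
  unfold pvInv
  refine ⟨by simp [hcur_len], ?_, ?_, hs'1, by omega, hs'arr⟩
  · intro m hm
    rw [pvGetD_set]
    split_ifs with h
    · rw [← h.1]; exact hvwrite
    · apply hcur_at
      rcases Nat.lt_or_ge m (j+1) with h' | h'
      · exact h'
      · exfalso; exact h ⟨by omega, by rw [hcur_len]; omega⟩
  · intro m hm
    rw [pvGetD_set]
    split_ifs with h
    · omega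
    · exact hcur_big m (by omega)

theorem pvRowA_spec {i n : Nat} (hi : 2 ≤ i) (prev : List Int)
    (hprev : pvRowVals (i-1) n prev) : pvRowVals i n (pvRowA prev n) := by
  obtain ⟨hprevl, hprevv⟩ := hprev
  have main : ∀ c, c ≤ n → pvInv i n c
      ((List.range' 1 c).foldl (pvColStep prev) (List.replicate (n+1) (0:Int), 1)) := by
    intro c
    induction c with
    | zero =>
      intro _
      refine ⟨by simp, ?_, ?_, le_rfl, by simp, Or.inl rfl⟩
      · intro m hm
        have : m = 0 := by omega
        subst this
        rw [List.range'_zero, List.foldl_nil]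
        show (List.replicate (n+1) (0:Int)).getD 0 0 = _
        rw [pvGetD_replicate0, pvT_zero]
        rfl
      · intro m _
        rw [List.range'_zero, List.foldl_nil]
        show (List.replicate (n+1) (0:Int)).getD m 0 = 0
        exact pvGetD_replicate0 _ _
    | succ c ihc =>
      intro hc
      rw [List.range'_concat, List.foldl_append, List.foldl_cons, List.foldl_nil]
      have h1c : 1 + 1*c = c + 1 := by omega
      rw [h1c]
      exact pvColStep_inv hi prev hprevl hprevv _ (ihc (by omega)) hc
  obtain ⟨hlen, hval, _⟩ := main n le_rfl
  exact ⟨hlen, fun m hm => hval m hm⟩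

-- == port A computes pvT k n ==
theorem superA_eval (K N : Int) (hPre : Pre_super_egg_drop2 K N) :
    super_egg_drop2 K N = (pvT K.toNat N.toNat : Int) := by
  obtain ⟨hN, hK⟩ := hPre
  rcases hK with hK1 | ⟨hK0, hN0⟩
  · show (((List.range' 2 (K.toNat-1)).foldl
        (fun d i => d.set i (pvRowA (d.getD (i-1) []) N.toNat))
        ((List.replicate (K.toNat+1) (List.replicate (N.toNat+1) (0:Int))).set 1
          (pvRow1 N.toNat))).getD K.toNat []).getD N.toNat 0 = (pvT K.toNat N.toNat : Int)
    generalize hkk : K.toNat = k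
    generalize hnn : N.toNat = n
    have hk1 : 1 ≤ k := by omega
    have main : ∀ c, c ≤ k - 1 →
        (((List.range' 2 c).foldl (fun d i => d.set i (pvRowA (d.getD (i-1) []) n))
            ((List.replicate (k+1) (List.replicate (n+1) (0:Int))).set 1 (pvRow1 n))).length
            = k + 1 ∧
         ∀ i, 1 ≤ i → i ≤ c + 1 → i ≤ k →
           pvRowVals i n (((List.range' 2 c).foldl
             (fun d i => d.set i (pvRowA (d.getD (i-1) []) n))
             ((List.replicate (k+1) (List.replicate (n+1) (0:Int))).set 1 (pvRow1 n))).getD i [])) := by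
      intro c
      induction c with
      | zero =>
        intro _
        refine ⟨by simp, ?_⟩
        intro i h1 h2 h3
        have : i = 1 := by omega
        subst this
        rw [List.range'_zero, List.foldl_nil, pvGetD_set, if_pos ⟨rfl, by simp; omega⟩]
        exact pvRow1_spec n
      | succ c ihc =>
        intro hc
        obtain ⟨ihl, ihv⟩ := ihc (by omega)
        rw [List.range'_concat, List.foldl_append, List.foldl_cons, List.foldl_nil]
        have h2c : 2 + 1*c = c + 2 := by omega
        rw [h2c]
        set dpc := (List.range' 2 c).foldl (fun d i => d.set i (pvRowA (d.getD (i-1) []) n))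
            ((List.replicate (k+1) (List.replicate (n+1) (0:Int))).set 1 (pvRow1 n)) with hdpc
        have hprev : pvRowVals (c+1) n (dpc.getD (c+1) []) := ihv (c+1) (by omega) (by omega) (by omega)
        have hrow : pvRowVals (c+2) n (pvRowA (dpc.getD (c+1) []) n) := by
          have h := pvRowA_spec (i := c+2) (by omega) (dpc.getD (c+1) []) (by
            have he : c + 2 - 1 = c + 1 := by omega
            rw [he]; exact hprev)
          exact h
        refine ⟨by simp [ihl], ?_⟩
        intro i h1 h2 h3
        rw [pvGetD_set]
        by_cases hcase : c + 2 = i ∧ c + 2 < dpc.length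
        · rw [if_pos hcase]
          obtain ⟨hieq, _⟩ := hcase
          subst hieq
          exact hrow
        · rw [if_neg hcase]
          have hne : i ≠ c + 2 := fun hc' => hcase ⟨hc'.symm, by rw [ihl]; omega⟩
          exact ihv i h1 (by omega) h3
    obtain ⟨_, hval⟩ := main (k-1) le_rfl
    exact (hval k hk1 (by omega) le_rfl).2 n le_rfl
  · subst hK0
    have hN0' : N = 0 := hN0
    subst hN0'
    decide

-- == port B ==
theorem pvStepB_length : ∀ (m : Nat) (f : List Int), (pvStepB f m).length = f.length := by
  intro m
  induction m with
  | zero => intro f; rfl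
  | succ m ih => intro f; rw [pvStepB, ih]; simp

theorem pvStepB_spec (t L : Nat) : ∀ (m : Nat) (f : List Int), f.length = L → m < L →
    (∀ i, i < L → f.getD i 0 = (if i ≤ m then (pvF t i : Int) else (pvF (t+1) i : Int))) →
    ∀ i, i < L → (pvStepB f m).getD i 0 = (pvF (t+1) i : Int) := by
  intro m
  induction m with
  | zero =>
    intro f _ _ hf i hi
    have h := hf i hi
    show f.getD i 0 = _
    rcases Nat.eq_zero_or_pos i with rfl | hpos
    · rw [h, if_pos le_rfl]
      norm_num [pvF_zero_right]
    · rw [h, if_neg (by omega)]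
  | succ m ih =>
    intro f hlen hm hf i hi
    rw [pvStepB]
    apply ih _ (by simp [hlen]) (by omega) _ i hi
    intro i' hi'
    rw [pvGetD_set]
    by_cases hcase : m + 1 = i' ∧ m + 1 < f.length
    · rw [if_pos hcase]
      obtain ⟨hieq, _⟩ := hcase
      subst hieq
      rw [if_neg (by omega)]
      rw [hf (m+1) (by omega), if_pos le_rfl, hf m (by omega), if_pos (by omega)]
      push_cast [pvF_succ]
      ring
    · rw [if_neg hcase]
      rw [hf i' hi']
      have hne : ¬ (m + 1 = i') := fun hc => hcase ⟨hc, by omega⟩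
      split_ifs with h1 h2 h3
      · rfl
      · omega
      · omega
      · rfl

theorem pvLoopB_spec (k : Nat) (N : Int) (hk : 1 ≤ k) (hN : 0 ≤ N) :
    ∀ (fuel t : Nat) (f : List Int), f.length = k + 1 →
    (∀ i, i ≤ k → f.getD i 0 = (pvF t i : Int)) →
    t ≤ pvT k N.toNat → pvT k N.toNat ≤ t + fuel →
    pvLoopB k N f t fuel = pvT k N.toNat := by
  intro fuel
  induction fuel with
  | zero =>
    intro t f _ _ h1 h2
    show t = _
    omega
  | succ fuel ih =>
    intro t f hlen hf h1 h2
    rw [pvLoopB]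
    have hfk : f.getD k 0 = (pvF t k : Int) := hf k le_rfl
    have hNcast : ((N.toNat : Int)) = N := Int.toNat_of_nonneg hN
    split_ifs with hcond
    · rw [hfk] at hcond
      have hlt : pvF t k < N.toNat := by omega
      have htlt : t < pvT k N.toNat := by
        by_contra hc
        push_neg at hc
        have := (pvT_le_iff hk N.toNat t).mp hc
        omega
      apply ih (t+1) (pvStepB f k) (by rw [pvStepB_length]; exact hlen)
      · intro i hi
        apply pvStepB_spec t (k+1) k f hlen (by omega) _ i (by omega)
        intro i' hi'
        rw [if_pos (by omega)]
        exact hf i' (by omega)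
      · omega
      · omega
    · rw [hfk] at hcond
      have hge : N.toNat ≤ pvF t k := by omega
      have := (pvT_le_iff hk N.toNat t).mpr hge
      omega

theorem superB_eval (K N : Int) (hPre : Pre_super_egg_drop2 K N) :
    super_egg_drop2_alt K N = (pvT K.toNat N.toNat : Int) := by
  obtain ⟨hN, hK⟩ := hPre
  rcases hK with hK1 | ⟨hK0, hN0⟩
  · have hk : 1 ≤ K.toNat := by omega
    show ((pvLoopB K.toNat N (List.replicate (K.toNat+1) (0:Int)) 0 N.toNat : Nat) : Int) = _
    rw [pvLoopB_spec K.toNat N hk hN N.toNat 0 _ (by simp)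
      (fun i _ => by rw [pvGetD_replicate0]; norm_num [pvF])
      (by omega)
      (by simpa using pvT_le_self hk N.toNat)]
  · subst hK0
    have hN0' : N = 0 := hN0
    subst hN0'
    decide

-- ===== VERDICT (by name: the statement is the Claim_ definition above) =====
theorem super_egg_drop2_spec : Claim_equal_super_egg_drop2 := by
  intro K N _ hPre
  show super_egg_drop2 K N = super_egg_drop2_alt K N
  rw [superA_eval K N hPre, superB_eval K N hPre]
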